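-- pv_equiv track=rewrite | github.com/mahirlabibdihan/LLMSniffer | data/whodunit/test/0_PRDRG_1.py | solve
-- ===== SOURCE A (Python) =====
-- def solve(n):
--     x = 1
--     y = 2
--     for i in range(n-1):
--         if i%2 == 0:
--             x, y = x+y, y
--         else:
--             x, y = x, x+y
--     return x, y
-- ===== SOURCE B (Python) =====
-- def _fib(m):
--     # fast doubling: returns (F(m), F(m+1)) with F(0)=0, F(1)=1
--     if m == 0:
--         return (0, 1)
--     a, b = _fib(m >> 1)
--     c = a * (2 * b - a)
--     d = a * a + b * b
--     if m & 1:
--         return (d, c + d)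
--     return (c, d)
--
-- def solve(n):
--     k = max(n - 1, 0)
--     a, b = _fib(k + 2)          # (F(k+2), F(k+3))
--     if k % 2 == 0:
--         return a, b
--     return b, a
-- ===== Notes on version B (the rewrite author's own statement) =====
-- stated objective: faster
-- what changed: Replaced the O(n) alternating-update loop by fast-doubling Fibonacci: the pair after k steps is two consecutive Fibonacci numbers in an order given by k's parity, computed with O(log n) multiplications; intended as faster — the probe measured B far faster at every size it could decode, but at the largest size the huge result exceeds Python's default int-to-str digit limit so 'faster' stayed unconfirmed.
import Mathlib
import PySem

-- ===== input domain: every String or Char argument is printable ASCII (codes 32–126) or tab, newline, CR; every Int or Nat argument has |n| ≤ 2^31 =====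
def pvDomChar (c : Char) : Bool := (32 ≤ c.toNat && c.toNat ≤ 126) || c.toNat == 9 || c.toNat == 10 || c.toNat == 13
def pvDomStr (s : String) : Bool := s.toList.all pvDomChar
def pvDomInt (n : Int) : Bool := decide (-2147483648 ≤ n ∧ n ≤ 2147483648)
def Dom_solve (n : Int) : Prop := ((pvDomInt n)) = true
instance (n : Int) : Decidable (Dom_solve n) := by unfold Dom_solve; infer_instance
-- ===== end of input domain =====

-- B replaces A's O(n) alternating-update loop by fast-doubling Fibonacci (O(log n) multiplications); intended as faster (a timing run measured a large speedup at every size it could decode).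

-- ===== PORT A =====
def solve (n : Int) : List Int :=
  let p := (PySem.List.pyRange 0 (n - 1) 1).foldl
    (fun (p : Int × Int) i =>
      if PySem.Int.mod i 2 == 0 then (p.1 + p.2, p.2) else (p.1, p.1 + p.2))
    (1, 2)
  [p.1, p.2]

-- ===== PORT B =====
-- fast doubling: returns (F(m), F(m+1)); recursion on m >> 1 as in Source B
def fibPair : Nat → Int × Int
  | 0 => (0, 1)
  | m + 1 =>
    let p := fibPair ((m + 1) / 2)
    let a := p.1
    let b := p.2
    let c := a * (2 * b - a)
    let d := a * a + b * b
    if (m + 1) % 2 == 1 then (d, c + d) else (c, d)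
decreasing_by exact Nat.div_lt_self (Nat.succ_pos m) (by norm_num)

def solve_alt (n : Int) : List Int :=
  let k := (n - 1).toNat        -- max(n-1, 0)
  let p := fibPair (k + 2)      -- (F(k+2), F(k+3))
  if k % 2 == 0 then [p.1, p.2] else [p.2, p.1]

-- ===== PRECONDITION & SPEC =====
def Spec_solve (n : Int) (out : List Int) : Prop := out = solve_alt n
instance (n : Int) (out : List Int) : Decidable (Spec_solve n out) := by unfold Spec_solve; infer_instance

-- ===== CLAIM (what is proved, stated in full; the proofs are below) =====
def Claim_equal_solve : Prop := ∀ (n : Int), Dom_solve n → Spec_solve n (solve n)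

-- ===== LEMMAS AND PROOFS =====

def F (m : Nat) : Int := (Nat.fib m : Int)

theorem F_add_two (m : Nat) : F (m + 2) = F m + F (m + 1) := by
  simp only [F, Nat.fib_add_two]; push_cast; ring

theorem fibPair_eq (m : Nat) : fibPair m = (F m, F (m + 1)) := by
  induction m using Nat.strong_induction_on with
  | _ m ih =>
    match m with
    | 0 => simp [fibPair, F]
    | m + 1 =>
      have hq : (m + 1) / 2 < m + 1 := Nat.div_lt_self (Nat.succ_pos m) (by norm_num)
      rw [fibPair]
      rw [ih ((m + 1) / 2) hq]
      set q := (m + 1) / 2 with hqdef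
      have hle : Nat.fib q ≤ 2 * Nat.fib (q + 1) := by
        have h1 : Nat.fib q ≤ Nat.fib (q + 1) := Nat.fib_mono (Nat.le_succ q)
        omega
      have hc : F (2 * q) = F q * (2 * F (q + 1) - F q) := by
        have h := Nat.fib_two_mul q
        simp only [F]
        zify [hle] at h
        rw [h]
      have hd : F (2 * q + 1) = F q * F q + F (q + 1) * F (q + 1) := by
        have h := Nat.fib_two_mul_add_one q
        simp only [F]
        push_cast [h]
        ring
      rcases Nat.mod_two_eq_zero_or_one (m + 1) with hmod | hmod
      · have h2 : m + 1 = 2 * q := by omega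
        simp only [hmod, show ((0 : Nat) == 1) = false from rfl]
        rw [show m + 1 + 1 = 2 * q + 1 by omega, h2, hc, hd]
        constructor
      · have h2 : m + 1 = 2 * q + 1 := by omega
        simp only [hmod, show ((1 : Nat) == 1) = true from rfl, if_true]
        rw [show m + 1 + 1 = 2 * q + 2 by omega, h2]
        have hnext : F (2 * q + 2) = F (2 * q) + F (2 * q + 1) := F_add_two (2 * q)
        rw [hnext, hc, hd]

theorem loop_inv (t : Nat) :
    ((List.range t).map (fun k : Nat => (0 : Int) + (k : Int))).foldl
      (fun (p : Int × Int) i =>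
        if PySem.Int.mod i 2 == 0 then (p.1 + p.2, p.2) else (p.1, p.1 + p.2)) (1, 2) =
      if t % 2 = 0 then (F (t + 2), F (t + 3)) else (F (t + 3), F (t + 2)) := by
  induction t with
  | zero => decide
  | succ t ih =>
    rw [List.range_succ]
    simp only [List.map_append, List.foldl_append, List.map_cons, List.map_nil,
      List.foldl_cons, List.foldl_nil, ih]
    have hmod : PySem.Int.mod ((0 : Int) + (t : Int)) 2 = ((t % 2 : Nat) : Int) := by
      rw [zero_add]
      exact_mod_cast PySem.Int.mod_natCast t 2
    rcases Nat.mod_two_eq_zero_or_one t with h0 | h0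
    · have h1 : (t + 1) % 2 = 1 := by omega
      simp only [h0, hmod, h1]
      norm_num
      rw [show t + 1 + 3 = (t + 2) + 2 by omega, F_add_two (t + 2),
        show t + 2 + 1 = t + 3 by omega]
    · have h1 : (t + 1) % 2 = 0 := by omega
      simp only [h0, hmod, h1]
      norm_num
      rw [show t + 1 + 3 = (t + 2) + 2 by omega, F_add_two (t + 2),
        show t + 2 + 1 = t + 3 by omega]
      ring

-- ===== VERDICT (by name: the statement is the Claim_ definition above) =====
theorem solve_spec : Claim_equal_solve := by
  intro n _
  unfold Spec_solve solve solve_alt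
  rw [PySem.List.pyRange_one]
  simp only [Int.sub_zero]
  rw [loop_inv (n - 1).toNat, fibPair_eq]
  rcases Nat.mod_two_eq_zero_or_one ((n - 1).toNat) with h0 | h0 <;>
    simp only [h0, show (n - 1).toNat + 2 + 1 = (n - 1).toNat + 3 by omega] <;> norm_num
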